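-- pv_equiv track=rewrite | github.com/AlexBeck-MRM/mindtype-app | tools/generate_fuzzy_training.py | get_adjacent_keys
-- ===== SOURCE A (Python) =====
-- from typing import List, Tuple
--
-- QWERTY_POS = {
--     'q': (0, 0), 'w': (0, 1), 'e': (0, 2), 'r': (0, 3), 't': (0, 4),
--     'y': (0, 5), 'u': (0, 6), 'i': (0, 7), 'o': (0, 8), 'p': (0, 9),
--     'a': (1, 0), 's': (1, 1), 'd': (1, 2), 'f': (1, 3), 'g': (1, 4),
--     'h': (1, 5), 'j': (1, 6), 'k': (1, 7), 'l': (1, 8),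
--     'z': (2, 0), 'x': (2, 1), 'c': (2, 2), 'v': (2, 3), 'b': (2, 4),
--     'n': (2, 5), 'm': (2, 6),
-- }
--
-- def get_adjacent_keys(char: str) -> List[str]:
--     if char not in QWERTY_POS:
--         return [char]
--     row, col = QWERTY_POS[char]
--     adjacent = []
--     for r in range(max(0, row-1), min(3, row+2)):
--         for c in range(max(0, col-1), min(10, col+2)):
--             for k, (kr, kc) in QWERTY_POS.items():
--                 if kr == r and kc == c and k != char:
--                     adjacent.append(k)
--     return adjacent if adjacent else [char]
-- ===== SOURCE B (Python) =====
-- from typing import List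
--
-- # Precomputed QWERTY adjacency table: each key mapped to its neighbors in
-- # row-major (row, then column) order, matching the keyboard layout geometry.
-- QWERTY_ADJ = {
--     'q': ['w', 'a', 's'],
--     'w': ['q', 'e', 'a', 's', 'd'],
--     'e': ['w', 'r', 's', 'd', 'f'],
--     'r': ['e', 't', 'd', 'f', 'g'],
--     't': ['r', 'y', 'f', 'g', 'h'],
--     'y': ['t', 'u', 'g', 'h', 'j'],
--     'u': ['y', 'i', 'h', 'j', 'k'],
--     'i': ['u', 'o', 'j', 'k', 'l'],
--     'o': ['i', 'p', 'k', 'l'],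
--     'p': ['o', 'l'],
--     'a': ['q', 'w', 's', 'z', 'x'],
--     's': ['q', 'w', 'e', 'a', 'd', 'z', 'x', 'c'],
--     'd': ['w', 'e', 'r', 's', 'f', 'x', 'c', 'v'],
--     'f': ['e', 'r', 't', 'd', 'g', 'c', 'v', 'b'],
--     'g': ['r', 't', 'y', 'f', 'h', 'v', 'b', 'n'],
--     'h': ['t', 'y', 'u', 'g', 'j', 'b', 'n', 'm'],
--     'j': ['y', 'u', 'i', 'h', 'k', 'n', 'm'],
--     'k': ['u', 'i', 'o', 'j', 'l', 'm'],
--     'l': ['i', 'o', 'p', 'k'],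
--     'z': ['a', 's', 'x'],
--     'x': ['a', 's', 'd', 'z', 'c'],
--     'c': ['s', 'd', 'f', 'x', 'v'],
--     'v': ['d', 'f', 'g', 'c', 'b'],
--     'b': ['f', 'g', 'h', 'v', 'n'],
--     'n': ['g', 'h', 'j', 'b', 'm'],
--     'm': ['h', 'j', 'k', 'n'],
-- }
--
-- def get_adjacent_keys(char: str) -> List[str]:
--     return QWERTY_ADJ.get(char, [char])
-- ===== Notes on version B (the rewrite author's own statement) =====
-- stated objective: alternative
-- what changed: A recomputes adjacency on every call by iterating the up-to-9 neighbor grid cells and rescanning the whole 26-entry coordinate table once per cell; B replaces all loops with a single lookup in a precomputed adjacency table (every key has neighbors, so A's empty-list fallback is unreachable and folds into dict.get's default).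
import Mathlib
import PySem

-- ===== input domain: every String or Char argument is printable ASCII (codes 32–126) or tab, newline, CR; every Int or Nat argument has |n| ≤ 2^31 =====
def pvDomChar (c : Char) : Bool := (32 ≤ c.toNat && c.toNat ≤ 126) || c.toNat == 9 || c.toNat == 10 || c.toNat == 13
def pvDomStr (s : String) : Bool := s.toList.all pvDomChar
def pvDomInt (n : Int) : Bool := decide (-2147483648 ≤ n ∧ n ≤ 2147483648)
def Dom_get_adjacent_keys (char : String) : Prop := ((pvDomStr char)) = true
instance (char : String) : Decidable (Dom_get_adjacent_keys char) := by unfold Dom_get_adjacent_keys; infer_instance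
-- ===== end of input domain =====

-- B replaces A's per-call nested grid loops (each rescanning the coordinate table)
-- by a single lookup in a precomputed adjacency table; objective: alternative.

-- the module-level QWERTY_POS dict, in its Python insertion order
def qwertyPos : PySem.Dict String (Int × Int) := PySem.Dict.ofList
  [("q",(0,0)), ("w",(0,1)), ("e",(0,2)), ("r",(0,3)), ("t",(0,4)),
   ("y",(0,5)), ("u",(0,6)), ("i",(0,7)), ("o",(0,8)), ("p",(0,9)),
   ("a",(1,0)), ("s",(1,1)), ("d",(1,2)), ("f",(1,3)), ("g",(1,4)),
   ("h",(1,5)), ("j",(1,6)), ("k",(1,7)), ("l",(1,8)),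
   ("z",(2,0)), ("x",(2,1)), ("c",(2,2)), ("v",(2,3)), ("b",(2,4)),
   ("n",(2,5)), ("m",(2,6))]

-- ===== PORT A =====
def get_adjacent_keys (char : String) : List String :=
  match qwertyPos.get? char with
  | none => [char]
  | some (row, col) =>
    let adjacent :=
      (PySem.List.pyRange (max 0 (row - 1)) (min 3 (row + 2)) 1).foldl (fun acc r =>
        (PySem.List.pyRange (max 0 (col - 1)) (min 10 (col + 2)) 1).foldl (fun acc c =>
          qwertyPos.items.foldl (fun acc kv =>
            if kv.2.1 == r && kv.2.2 == c && kv.1 != char then acc ++ [kv.1] else acc) acc) acc) []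
    if adjacent = [] then [char] else adjacent

-- ===== PORT B =====
-- Source B's module-level precomputed adjacency dict QWERTY_ADJ
def qwertyAdj : PySem.Dict String (List String) := PySem.Dict.ofList
  [("q", ["w","a","s"]),
   ("w", ["q","e","a","s","d"]),
   ("e", ["w","r","s","d","f"]),
   ("r", ["e","t","d","f","g"]),
   ("t", ["r","y","f","g","h"]),
   ("y", ["t","u","g","h","j"]),
   ("u", ["y","i","h","j","k"]),
   ("i", ["u","o","j","k","l"]),
   ("o", ["i","p","k","l"]),
   ("p", ["o","l"]),
   ("a", ["q","w","s","z","x"]),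
   ("s", ["q","w","e","a","d","z","x","c"]),
   ("d", ["w","e","r","s","f","x","c","v"]),
   ("f", ["e","r","t","d","g","c","v","b"]),
   ("g", ["r","t","y","f","h","v","b","n"]),
   ("h", ["t","y","u","g","j","b","n","m"]),
   ("j", ["y","u","i","h","k","n","m"]),
   ("k", ["u","i","o","j","l","m"]),
   ("l", ["i","o","p","k"]),
   ("z", ["a","s","x"]),
   ("x", ["a","s","d","z","c"]),
   ("c", ["s","d","f","x","v"]),
   ("v", ["d","f","g","c","b"]),
   ("b", ["f","g","h","v","n"]),
   ("n", ["g","h","j","b","m"]),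
   ("m", ["h","j","k","n"])]

def get_adjacent_keys_alt (char : String) : List String :=
  qwertyAdj.getD char [char]

-- ===== PRECONDITION & SPEC =====
def Spec_get_adjacent_keys (char : String) (out : List String) : Prop := out = get_adjacent_keys_alt char
instance (char : String) (out : List String) : Decidable (Spec_get_adjacent_keys char out) := by unfold Spec_get_adjacent_keys; infer_instance

-- ===== CLAIM (what is proved, stated in full; the proofs are below) =====
def Claim_equal_get_adjacent_keys : Prop := ∀ (char : String), Dom_get_adjacent_keys char → Spec_get_adjacent_keys char (get_adjacent_keys char)

-- ===== LEMMAS AND PROOFS =====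

-- if char is none of the 26 keys, both lookups fail and both ports return [char]
lemma get?_none_of_not_key {ν : Type} (d : PySem.Dict String ν) (char : String)
    (h : ∀ p ∈ d.items, p.1 ≠ char) : d.get? char = none := by
  rw [PySem.Dict.get?_eq_none_iff_not_mem_keys]
  intro hmem
  obtain ⟨p, hp, hp1⟩ := List.mem_map.mp hmem
  exact h p hp hp1

-- ===== VERDICT (by name: the statement is the Claim_ definition above) =====
set_option maxRecDepth 4096 in
theorem get_adjacent_keys_spec : Claim_equal_get_adjacent_keys := by
  intro char _
  unfold Spec_get_adjacent_keys
  by_cases h : ∃ p ∈ qwertyPos.items, p.1 = char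
  · obtain ⟨p, hp, rfl⟩ := h
    fin_cases hp <;> decide
  · push Not at h
    have hA : qwertyPos.get? char = none := get?_none_of_not_key qwertyPos char h
    have hB : qwertyAdj.get? char = none := by
      rw [PySem.Dict.get?_eq_none_iff_not_mem_keys]
      have hkeys : qwertyAdj.keys = qwertyPos.keys := by decide
      rw [hkeys, PySem.Dict.keys]
      intro hmem
      obtain ⟨p, hp, hp1⟩ := List.mem_map.mp hmem
      exact h p hp hp1
    rw [get_adjacent_keys, get_adjacent_keys_alt, hA, PySem.Dict.getD, hB]
    rfl
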